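-- pv_equiv track=rewrite | github.com/Youyu-eyes/codeforces-classification | graph theory/permutation cycle/2033E. Sakurako, Kosuke, and the Permutation.py | solve
-- ===== SOURCE A (Python) =====
-- def solve(n, p):
--     for i in range(n):
--         p[i] -= 1
--
--     vis = [False] * n
--
--     # 递归 DFS 在本题行不通
--     # 因为数据范围为10**6，而 python 的递归最大深度为2e5，大约 10**5.3 次
--     # 出题人有意卡掉 DFS 的递归写法
--
--     def backtrack():
--         ans = 0
--         def dfs(i):
--             vis[i] = True
--             length = 1
--             if not vis[p[i]]:
--                 length += dfs(p[i])
--             return length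
--
--         for i in range(n):
--             if not vis[i]:
--                 l = dfs(i)
--                 if l > 2:
--                     ans += (l - 1) // 2
--         return ans
--
--     def iteration():
--         ans = 0
--         for i in range(n):
--             if not vis[i]:
--                 length = 0
--                 j = i
--                 while not vis[j]:
--                     vis[j] = True
--                     j = p[j]
--                     length += 1
--
--                 if length > 2:
--                     ans += (length - 1) // 2
--         return ans
--
--     return iteration()
-- ===== SOURCE B (Python) =====
-- def solve(n, p):
--     # B does not mutate p (A decrements p in place); it works on a fresh decremented copy.
--     q = [p[i] - 1 for i in range(n)]
--
--     def cycle_stats(i):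
--         # walk the whole cycle of i, tracking its length and minimum element
--         l, m, j = 1, i, q[i]
--         while j != i:
--             if j < m:
--                 m = j
--             l += 1
--             j = q[j]
--         return l, m
--
--     def contrib(i):
--         l, m = cycle_stats(i)
--         return (l - 1) // 2 if m == i else 0
--
--     return sum(contrib(i) for i in range(n))
-- ===== Notes on version B (the rewrite author's own statement) =====
-- stated objective: alternative
-- what changed: Replaced A's visited-array marking (each cycle walked once while marking nodes, with a length>2 guard) by a memoryless cycle-leader scan: every index walks its entire cycle tracking the length and the minimum element, and contributes (len-1)//2 exactly when it is its cycle's minimum; no visited array, no guard, and B does not mutate p (A decrements p in place), so the equivalence is about the return value.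
-- outside the precondition, e.g. on solve(2, [2, 2]): A returns 0, B does not finish within the time limit
import Mathlib
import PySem

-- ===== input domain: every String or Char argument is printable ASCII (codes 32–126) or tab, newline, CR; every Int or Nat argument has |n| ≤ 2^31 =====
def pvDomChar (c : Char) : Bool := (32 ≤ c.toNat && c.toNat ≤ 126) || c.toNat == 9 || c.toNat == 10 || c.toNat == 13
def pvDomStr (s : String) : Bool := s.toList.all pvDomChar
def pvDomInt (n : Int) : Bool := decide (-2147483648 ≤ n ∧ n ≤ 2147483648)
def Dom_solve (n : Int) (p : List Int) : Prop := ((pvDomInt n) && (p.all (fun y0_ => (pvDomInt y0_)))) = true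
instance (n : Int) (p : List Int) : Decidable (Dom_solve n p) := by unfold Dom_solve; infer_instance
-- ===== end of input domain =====

-- B replaces A's visited-array cycle marking by a memoryless cycle-leader scan: every index
-- walks its whole cycle tracking length and minimum, and contributes only if it is the minimum
-- ("alternative"). A mutates p in place (p[i] -= 1) and B does not: the equivalence proved is
-- about the return value only.


-- ===== PORT A =====
-- the 'while not vis[j]' loop; each iteration marks one unvisited index, so at most
-- vis.length iterations happen: fuel n+1 is never exhausted on inputs in Pre_solve.
def walkA (p : List Int) (fuel : Nat) (vis : List Bool) (j : Int) (len : Int) : List Bool × Int :=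
  match fuel with
  | 0 => (vis, len)
  | f+1 =>
    if vis.getD j.toNat false then (vis, len)
    else walkA p f (vis.set j.toNat true) (p.getD j.toNat 0) (len + 1)

-- indexing is total (getD): Pre_solve guarantees every index Python touches is in range.
def solve (n : Int) (p : List Int) : Int :=
  let q := (List.range n.toNat).foldl (fun l i => l.set i (l.getD i 0 - 1)) p
  let vis := List.replicate n.toNat false
  ((List.range n.toNat).foldl (fun st i =>
      if st.1.getD i false then st
      else
        let r := walkA q (n.toNat + 1) st.1 (i : Int) 0
        if r.2 > 2 then (r.1, st.2 + PySem.Int.floordiv (r.2 - 1) 2) else (r.1, st.2))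
    (vis, (0:Int))).2

-- ===== PORT B =====
-- the 'while j != i' loop of cycle_stats, carrying (length, min-so-far); on Pre_solve inputs
-- the walk returns to i within n steps, so fuel n+1 is never exhausted.
def cycB (q : List Int) (fuel : Nat) (i : Int) (l : Int) (m : Int) (j : Int) : Int × Int :=
  match fuel with
  | 0 => (l, m)
  | f+1 =>
    if j ≠ i then cycB q f i (l + 1) (if j < m then j else m) (q.getD j.toNat 0)
    else (l, m)

def solve_alt (n : Int) (p : List Int) : Int :=
  let q := (List.range n.toNat).map (fun i => p.getD i 0 - 1)
  ((List.range n.toNat).map (fun (i : Nat) =>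
      let r := cycB q (n.toNat + 1) (i : Int) 1 (i : Int) (q.getD i 0)
      if r.2 = (i : Int) then PySem.Int.floordiv (r.1 - 1) 2 else 0)).sum

-- ===== PRECONDITION & SPEC =====
-- Pre_solve: the contest problem's input contract — p is a permutation of 1..n (plus the
-- trivial n ≤ 0, where both programs do nothing). Pre_ excludes inputs with n > 0 whose p is
-- not such a permutation: there A raises, wraps negative indices, or returns a sum over
-- marking-order segments that is an artefact of its visited array, and B's cycle walk need
-- not terminate.
def Pre_solve (n : Int) (p : List Int) : Prop :=
  n ≤ 0 ∨ (n = (p.length : Int) ∧ ∀ k ∈ List.range p.length, ((k : Int) + 1) ∈ p)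
instance (n : Int) (p : List Int) : Decidable (Pre_solve n p) := by unfold Pre_solve; infer_instance
def pvWitness_solve : Int × List Int := (5, [2, 1, 4, 5, 3])
def Spec_solve (n : Int) (p : List Int) (out : Int) : Prop := out = solve_alt n p
instance (n : Int) (p : List Int) (out : Int) : Decidable (Spec_solve n p out) := by unfold Spec_solve; infer_instance

-- ===== CLAIM (what is proved, stated in full; the proofs are below) =====
def Claim_equal_solve : Prop := ∀ (n : Int) (p : List Int), Dom_solve n p → Pre_solve n p → Spec_solve n p (solve n p)

-- ===== LEMMAS AND PROOFS =====

-- g-world: the decremented list as a function Nat → Nat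
def gfun (q : List Int) (i : Nat) : Nat := (q.getD i 0).toNat

-- order (least positive period) of i under g, bounded by m
def ordg (g : Nat → Nat) (m i : Nat) : Nat :=
  if h : ∃ t, t < m ∧ g^[t+1] i = i then Nat.find h + 1 else 1

-- minimum of the first t elements of i's orbit
def omin (g : Nat → Nat) (i : Nat) : Nat → Nat
  | 0 => i
  | t+1 => min (omin g i t) (g^[t] i)

-- x lies on the cycle of i
def Orb (g : Nat → Nat) (i x : Nat) : Prop := ∃ t, g^[t] i = x

-- x's cycle contains an element smaller than k (A's "visited after processing [0,k)")
def Vis (g : Nat → Nat) (k x : Nat) : Prop := ∃ t, g^[t] x < k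

-- i is the minimum of its cycle
def IsLead (g : Nat → Nat) (i : Nat) : Prop := ∀ t, i ≤ g^[t] i

theorem iterLt (g : Nat → Nat) (m : Nat) (hlt : ∀ i, i < m → g i < m) :
    ∀ (t i : Nat), i < m → g^[t] i < m := by
  intro t
  induction t with
  | zero => intro i h; simpa using h
  | succ t ih =>
    intro i h
    rw [Function.iterate_succ_apply']
    exact hlt _ (ih i h)

theorem iterCancel (g : Nat → Nat) (m : Nat) (hlt : ∀ i, i < m → g i < m)
    (hinj : ∀ i, i < m → ∀ j, j < m → g i = g j → i = j) :
    ∀ (t a b : Nat), a < m → b < m → g^[t] a = g^[t] b → a = b := by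
  intro t
  induction t with
  | zero => intro a b _ _ h; simpa using h
  | succ t ih =>
    intro a b ha hb h
    rw [Function.iterate_succ_apply'] at h
    rw [Function.iterate_succ_apply'] at h
    exact ih a b ha hb (hinj _ (iterLt g m hlt t a ha) _ (iterLt g m hlt t b hb) h)

theorem existsPeriod (g : Nat → Nat) (m : Nat) (hlt : ∀ i, i < m → g i < m)
    (hinj : ∀ i, i < m → ∀ j, j < m → g i = g j → i = j)
    (i : Nat) (hi : i < m) : ∃ t, t < m ∧ g^[t+1] i = i := by
  have hm : 0 < m := by omega
  have hcard : Fintype.card (Fin m) < Fintype.card (Fin (m+1)) := by simp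
  obtain ⟨a, b, hab, heq⟩ :=
    Fintype.exists_ne_map_eq_of_card_lt
      (fun t : Fin (m+1) => (⟨g^[t.1] i, iterLt g m hlt t.1 i hi⟩ : Fin m)) hcard
  have hval : g^[a.1] i = g^[b.1] i := congrArg Fin.val heq
  rcases Nat.lt_or_ge a.1 b.1 with hlt' | hge
  · refine ⟨b.1 - a.1 - 1, by omega, ?_⟩
    have h1 : g^[a.1 + (b.1 - a.1)] i = g^[a.1] i := by
      rw [Nat.add_sub_cancel' (Nat.le_of_lt hlt')]; exact hval.symm
    rw [Function.iterate_add_apply] at h1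
    have := iterCancel g m hlt hinj a.1 _ _ (iterLt g m hlt _ i hi) hi h1
    have hba : b.1 - a.1 - 1 + 1 = b.1 - a.1 := by omega
    rw [hba]; exact this
  · have hlt' : b.1 < a.1 := by
      rcases Nat.lt_or_ge b.1 a.1 with h | h
      · exact h
      · exact absurd (Fin.ext (by omega)) hab
    refine ⟨a.1 - b.1 - 1, by omega, ?_⟩
    have h1 : g^[b.1 + (a.1 - b.1)] i = g^[b.1] i := by
      rw [Nat.add_sub_cancel' (Nat.le_of_lt hlt')]; exact hval
    rw [Function.iterate_add_apply] at h1
    have := iterCancel g m hlt hinj b.1 _ _ (iterLt g m hlt _ i hi) hi h1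
    have hba : a.1 - b.1 - 1 + 1 = a.1 - b.1 := by omega
    rw [hba]; exact this

theorem ordg_pos (g : Nat → Nat) (m i : Nat) : 0 < ordg g m i := by
  unfold ordg; split <;> omega

theorem ordg_le (g : Nat → Nat) (m i : Nat)
    (h : ∃ t, t < m ∧ g^[t+1] i = i) : ordg g m i ≤ m := by
  unfold ordg; rw [dif_pos h]
  have h2 := (Nat.find_spec h).1
  omega

theorem iter_ordg (g : Nat → Nat) (m i : Nat)
    (h : ∃ t, t < m ∧ g^[t+1] i = i) : g^[ordg g m i] i = i := by
  unfold ordg; rw [dif_pos h]; exact (Nat.find_spec h).2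

theorem ordg_min (g : Nat → Nat) (m i : Nat)
    (h : ∃ t, t < m ∧ g^[t+1] i = i) :
    ∀ s, 0 < s → s < ordg g m i → g^[s] i ≠ i := by
  intro s hs hso hcon
  have hord : ordg g m i = Nat.find h + 1 := by unfold ordg; rw [dif_pos h]
  have hle := ordg_le g m i h
  have hmin := Nat.find_min h (m := s - 1) (by omega)
  apply hmin
  refine ⟨by omega, ?_⟩
  have hs1 : s - 1 + 1 = s := by omega
  rw [hs1]; exact hcon

theorem iter_ordg_mul (g : Nat → Nat) (m i : Nat)
    (h : ∃ t, t < m ∧ g^[t+1] i = i) : ∀ k, g^[ordg g m i * k] i = i := by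
  intro k
  induction k with
  | zero => simp
  | succ k ih =>
    have : ordg g m i * (k+1) = ordg g m i * k + ordg g m i := by ring
    rw [this, Function.iterate_add_apply, iter_ordg g m i h, ih]

theorem iter_mod (g : Nat → Nat) (m i : Nat)
    (h : ∃ t, t < m ∧ g^[t+1] i = i) : ∀ a, g^[a] i = g^[a % ordg g m i] i := by
  intro a
  conv_lhs => rw [← Nat.mod_add_div a (ordg g m i)]
  rw [Function.iterate_add_apply, iter_ordg_mul g m i h]

theorem orb_symm (g : Nat → Nat) (m : Nat) (hlt : ∀ i, i < m → g i < m)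
    (hinj : ∀ i, i < m → ∀ j, j < m → g i = g j → i = j)
    (i x : Nat) (hi : i < m) (h : Orb g i x) : Orb g x i := by
  obtain ⟨t, ht⟩ := h
  have hperi := existsPeriod g m hlt hinj i hi
  set o := ordg g m i with ho
  have hopos := ordg_pos g m i
  have hr : t % o < o := Nat.mod_lt _ hopos
  by_cases h0 : t % o = 0
  · refine ⟨0, ?_⟩
    have : x = i := by
      rw [← ht, iter_mod g m i hperi t, h0]; simp
    simp [this]
  · refine ⟨o - t % o, ?_⟩
    rw [← ht, ← Function.iterate_add_apply]
    have hdm := Nat.div_add_mod t o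
    have hmul : o * (t / o + 1) = o * (t / o) + o := by ring
    have : o - t % o + t = o * (t / o + 1) := by omega
    rw [this]
    exact iter_ordg_mul g m i hperi _

theorem orb_bounded (g : Nat → Nat) (m : Nat) (hlt : ∀ i, i < m → g i < m)
    (hinj : ∀ i, i < m → ∀ j, j < m → g i = g j → i = j)
    (i x : Nat) (hi : i < m) :
    Orb g i x ↔ ∃ s, s < ordg g m i ∧ g^[s] i = x := by
  constructor
  · rintro ⟨t, ht⟩
    refine ⟨t % ordg g m i, Nat.mod_lt _ (ordg_pos g m i), ?_⟩
    rw [← iter_mod g m i (existsPeriod g m hlt hinj i hi)]; exact ht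
  · rintro ⟨s, _, hs⟩; exact ⟨s, hs⟩

theorem vis_self_iff (g : Nat → Nat) (i : Nat) : Vis g i i ↔ ¬ IsLead g i := by
  unfold Vis IsLead
  rw [not_forall]
  constructor
  · rintro ⟨t, ht⟩; exact ⟨t, by omega⟩
  · rintro ⟨t, ht⟩; exact ⟨t, by omega⟩

theorem step_lead (g : Nat → Nat) (m : Nat) (hlt : ∀ i, i < m → g i < m)
    (hinj : ∀ i, i < m → ∀ j, j < m → g i = g j → i = j)
    (i : Nat) (hi : i < m) (x : Nat) (hx : x < m) :
    Vis g (i+1) x ↔ (Vis g i x ∨ Orb g i x) := by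
  constructor
  · rintro ⟨t, ht⟩
    rcases Nat.lt_or_ge (g^[t] x) i with h | h
    · exact Or.inl ⟨t, h⟩
    · have heq : g^[t] x = i := by omega
      exact Or.inr (orb_symm g m hlt hinj x i hx ⟨t, heq⟩)
  · rintro (⟨t, ht⟩ | horb)
    · exact ⟨t, by omega⟩
    · obtain ⟨t, ht⟩ := orb_symm g m hlt hinj i x hi horb
      exact ⟨t, by omega⟩

theorem step_notlead (g : Nat → Nat) (i x : Nat) (hnl : ¬ IsLead g i) :
    Vis g (i+1) x ↔ Vis g i x := by
  constructor
  · rintro ⟨t, ht⟩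
    rcases Nat.lt_or_ge (g^[t] x) i with h | h
    · exact ⟨t, h⟩
    · have heq : g^[t] x = i := by omega
      obtain ⟨u, hu⟩ : ∃ u, g^[u] i < i := by
        unfold IsLead at hnl; rw [not_forall] at hnl
        obtain ⟨u, hu⟩ := hnl; exact ⟨u, by omega⟩
      refine ⟨u + t, ?_⟩
      rw [Function.iterate_add_apply, heq]; exact hu
  · rintro ⟨t, ht⟩; exact ⟨t, by omega⟩

theorem lead_not_vis_orbit (g : Nat → Nat) (i : Nat) (hlead : IsLead g i) (s : Nat) :
    ¬ Vis g i (g^[s] i) := by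
  rintro ⟨t, ht⟩
  rw [← Function.iterate_add_apply] at ht
  exact absurd (hlead (t + s)) (by omega)

theorem orb_inj (g : Nat → Nat) (m : Nat) (hlt : ∀ i, i < m → g i < m)
    (hinj : ∀ i, i < m → ∀ j, j < m → g i = g j → i = j)
    (i : Nat) (hi : i < m) (a b : Nat)
    (ha : a < ordg g m i) (hb : b < ordg g m i) (h : g^[a] i = g^[b] i) : a = b := by
  have hper := existsPeriod g m hlt hinj i hi
  rcases Nat.lt_or_ge a b with hab | hab
  · exfalso
    have h1 : g^[a + (b - a)] i = g^[a] i := by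
      rw [Nat.add_sub_cancel' (Nat.le_of_lt hab)]; exact h.symm
    rw [Function.iterate_add_apply] at h1
    have h2 := iterCancel g m hlt hinj a _ _ (iterLt g m hlt _ i hi) hi h1
    exact ordg_min g m i hper (b - a) (by omega) (by omega) h2
  · rcases Nat.lt_or_ge b a with hba | hba
    · exfalso
      have h1 : g^[b + (a - b)] i = g^[b] i := by
        rw [Nat.add_sub_cancel' (Nat.le_of_lt hba)]; exact h
      rw [Function.iterate_add_apply] at h1
      have h2 := iterCancel g m hlt hinj b _ _ (iterLt g m hlt _ i hi) hi h1
      exact ordg_min g m i hper (a - b) (by omega) (by omega) h2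
    · omega

-- omin facts
theorem omin_le_iter (g : Nat → Nat) (i : Nat) :
    ∀ t s, s < t → omin g i t ≤ g^[s] i := by
  intro t
  induction t with
  | zero => intro s h; omega
  | succ t ih =>
    intro s hs
    rcases Nat.lt_or_ge s t with h | h
    · have h1 : omin g i (t+1) = min (omin g i t) (g^[t] i) := rfl
      calc omin g i (t+1) ≤ omin g i t := by rw [h1]; exact Nat.min_le_left _ _
        _ ≤ g^[s] i := ih s h
    · have hst : s = t := by omega
      have h1 : omin g i (t+1) = min (omin g i t) (g^[t] i) := rfl
      rw [hst, h1]; exact Nat.min_le_right _ _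

theorem omin_le_self (g : Nat → Nat) (i : Nat) (t : Nat) (ht : 1 ≤ t) :
    omin g i t ≤ i := by
  have := omin_le_iter g i t 0 (by omega)
  simpa using this

theorem omin_mem (g : Nat → Nat) (i : Nat) :
    ∀ t, 1 ≤ t → ∃ s, s < t ∧ omin g i t = g^[s] i := by
  intro t
  induction t with
  | zero => intro h; omega
  | succ t ih =>
    intro _
    rcases Nat.eq_zero_or_pos t with h0 | hpos
    · subst h0
      exact ⟨0, by omega, by unfold omin omin; simp⟩
    · obtain ⟨s, hs, hse⟩ := ih hpos
      unfold omin
      rcases Nat.le_total (omin g i t) (g^[t] i) with h | h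
      · exact ⟨s, by omega, by rw [min_eq_left h]; exact hse⟩
      · exact ⟨t, by omega, by rw [min_eq_right h]⟩

theorem omin_lead_iff (g : Nat → Nat) (m i : Nat) (hi : i < m)
    (hper : ∃ t, t < m ∧ g^[t+1] i = i) :
    omin g i (ordg g m i) = i ↔ IsLead g i := by
  have hpos := ordg_pos g m i
  constructor
  · intro he t
    rw [iter_mod g m i hper t]
    have := omin_le_iter g i (ordg g m i) (t % ordg g m i) (Nat.mod_lt _ hpos)
    omega
  · intro hlead
    obtain ⟨s, hs, hse⟩ := omin_mem g i (ordg g m i) hpos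
    have h1 := hlead s
    have h2 := omin_le_self g i (ordg g m i) hpos
    omega

theorem omin_notlead (g : Nat → Nat) (m i : Nat) (hi : i < m)
    (hper : ∃ t, t < m ∧ g^[t+1] i = i) (hnl : ¬ IsLead g i) :
    omin g i (ordg g m i) < i := by
  obtain ⟨u, hu⟩ : ∃ u, g^[u] i < i := by
    unfold IsLead at hnl; rw [not_forall] at hnl
    obtain ⟨u, hu⟩ := hnl; exact ⟨u, by omega⟩
  have hmod : g^[u % ordg g m i] i < i := by rw [← iter_mod g m i hper]; exact hu
  have := omin_le_iter g i (ordg g m i) (u % ordg g m i) (Nat.mod_lt _ (ordg_pos g m i))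
  omega

theorem getD_set_bool (vis : List Bool) (a x : Nat) (ha : a < vis.length) :
    (vis.set a true).getD x false = if x = a then true else vis.getD x false := by
  by_cases h : x = a
  · subst h; simp [List.getD, ha]
  · rw [if_neg h]
    unfold List.getD
    rw [List.getElem?_set_ne (by omega)]

theorem decAux (p : List Int) : ∀ k, k ≤ p.length →
    ((List.range k).foldl (fun l i => l.set i (l.getD i 0 - 1)) p).length = p.length ∧
    ∀ x, (h : x < p.length) →
      ((List.range k).foldl (fun l i => l.set i (l.getD i 0 - 1)) p).getD x 0
        = if x < k then p[x] - 1 else p[x] := by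
  intro k
  induction k with
  | zero =>
    intro _
    refine ⟨by simp, ?_⟩
    intro x h
    simp only [List.range_zero, List.foldl_nil]
    rw [List.getD_eq_getElem p 0 h, if_neg (by omega)]
  | succ k ih =>
    intro hk
    obtain ⟨ihl, ihx⟩ := ih (by omega)
    rw [List.range_succ, List.foldl_append]
    set L := (List.range k).foldl (fun l i => l.set i (l.getD i 0 - 1)) p with hL
    simp only [List.foldl_cons, List.foldl_nil]
    refine ⟨by simp [ihl], ?_⟩
    intro x h
    have hkL : k < L.length := by omega
    have hgd : ∀ y, (hy : y < p.length) → L.getD y 0 = L[y]'(by omega) := by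
      intro y hy; exact List.getD_eq_getElem L 0 (by omega)
    by_cases hxk : x = k
    · subst hxk
      rw [List.getD_eq_getElem _ 0 (by simpa [List.length_set] using (by omega : x < L.length))]
      rw [List.getElem_set, if_pos rfl]
      rw [hgd x h, ← List.getD_eq_getElem L 0 (by omega), ihx x h]
      rw [if_neg (by omega), if_pos (by omega)]
    · rw [List.getD_eq_getElem _ 0 (by simpa [List.length_set] using (by omega : x < L.length))]
      rw [List.getElem_set_ne (by omega)]
      rw [← List.getD_eq_getElem L 0 (by omega), ihx x h]
      by_cases hlt : x < k
      · rw [if_pos hlt, if_pos (by omega)]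
      · rw [if_neg hlt, if_neg (by omega)]

theorem walkA_spec (q : List Int) (g : Nat → Nat) (m : Nat)
    (hlt : ∀ i, i < m → g i < m)
    (hinj : ∀ i, i < m → ∀ j, j < m → g i = g j → i = j)
    (hq : ∀ x, x < m → q.getD x 0 = (g x : Int))
    (i : Nat) (hi : i < m) (hlead : IsLead g i) :
    ∀ (fuel t : Nat) (vis : List Bool),
    t ≤ ordg g m i →
    ordg g m i - t < fuel →
    vis.length = m →
    (∀ x, x < m → (vis.getD x false = true ↔ (Vis g i x ∨ ∃ s, s < t ∧ g^[s] i = x))) →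
    ∃ vis', walkA q fuel vis ((g^[t] i : Nat) : Int) ((t : Nat) : Int) = (vis', ((ordg g m i : Nat) : Int)) ∧
      vis'.length = m ∧
      (∀ x, x < m → (vis'.getD x false = true ↔ (Vis g i x ∨ Orb g i x))) := by
  intro fuel
  induction fuel with
  | zero => intro t vis _ hf; omega
  | succ f ih =>
    intro t vis htord hf hlen hrep
    have hgt : g^[t] i < m := iterLt g m hlt t i hi
    rcases Nat.lt_or_ge t (ordg g m i) with htlt | htge
    · -- unvisited: step
      have hfalse : vis.getD (g^[t] i) false = false := by
        rcases Bool.eq_false_or_eq_true (vis.getD (g^[t] i) false) with h | h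
        swap
        · exact h
        · exfalso
          rcases (hrep _ hgt).1 h with hv | ⟨s, hs, hsv⟩
          · exact lead_not_vis_orbit g i hlead t hv
          · exact absurd (orb_inj g m hlt hinj i hi s t (by omega) htlt hsv) (by omega)
      rw [walkA]
      simp only [Int.toNat_natCast, hfalse, Bool.false_eq_true, if_false]
      rw [hq _ hgt]
      have hstep : (g (g^[t] i) : Int) = ((g^[t+1] i : Nat) : Int) := by
        rw [Function.iterate_succ_apply']
      rw [hstep]
      have hcast : ((t : Nat) : Int) + 1 = ((t + 1 : Nat) : Int) := by push_cast; ring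
      rw [hcast]
      exact ih (t+1) (vis.set (g^[t] i) true) (by omega) (by omega)
        (by simp [hlen])
        (by
          intro x hx
          rw [getD_set_bool vis _ x (by omega)]
          by_cases hxe : x = g^[t] i
          · rw [if_pos hxe]
            simp only [true_iff]
            exact Or.inr ⟨t, by omega, hxe.symm⟩
          · rw [if_neg hxe, hrep x hx]
            constructor
            · rintro (h | ⟨s, hs, hsv⟩)
              · exact Or.inl h
              · exact Or.inr ⟨s, by omega, hsv⟩
            · rintro (h | ⟨s, hs, hsv⟩)
              · exact Or.inl h
              · have hst : s ≠ t := fun he => hxe (he ▸ hsv.symm)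
                exact Or.inr ⟨s, by omega, hsv⟩)
    · -- t = ordg: stop
      have hteq : t = ordg g m i := by omega
      have hiq : g^[t] i = i := by
        rw [hteq]; exact iter_ordg g m i (existsPeriod g m hlt hinj i hi)
      have htrue : vis.getD (g^[t] i) false = true := by
        rw [hiq]
        exact (hrep i hi).2 (Or.inr ⟨0, by have := ordg_pos g m i; omega, by simp⟩)
      rw [walkA]
      simp only [Int.toNat_natCast, htrue, if_true]
      refine ⟨vis, by rw [hteq], hlen, ?_⟩
      intro x hx
      rw [hrep x hx, hteq]
      rw [orb_bounded g m hlt hinj i x hi]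

theorem cycB_spec (q : List Int) (g : Nat → Nat) (m : Nat)
    (hlt : ∀ i, i < m → g i < m)
    (hinj : ∀ i, i < m → ∀ j, j < m → g i = g j → i = j)
    (hq : ∀ x, x < m → q.getD x 0 = (g x : Int))
    (i : Nat) (hi : i < m) :
    ∀ (fuel t : Nat),
    1 ≤ t → t ≤ ordg g m i → ordg g m i - t < fuel →
    cycB q fuel ((i : Nat) : Int) ((t : Nat) : Int) ((omin g i t : Nat) : Int) ((g^[t] i : Nat) : Int)
      = (((ordg g m i : Nat) : Int), ((omin g i (ordg g m i) : Nat) : Int)) := by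
  have hper := existsPeriod g m hlt hinj i hi
  intro fuel
  induction fuel with
  | zero => intro t _ _ hf; omega
  | succ f ih =>
    intro t ht1 htord hf
    have hgt : g^[t] i < m := iterLt g m hlt t i hi
    rcases Nat.lt_or_ge t (ordg g m i) with htlt | htge
    · have hne : g^[t] i ≠ i := ordg_min g m i hper t (by omega) htlt
      rw [cycB]
      rw [if_pos (by exact_mod_cast hne)]
      rw [Int.toNat_natCast, hq _ hgt]
      have hstep : (g (g^[t] i) : Int) = ((g^[t+1] i : Nat) : Int) := by
        rw [Function.iterate_succ_apply']
      have hcast : ((t : Nat) : Int) + 1 = ((t + 1 : Nat) : Int) := by push_cast; ring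
      have hmin : (if ((g^[t] i : Nat) : Int) < ((omin g i t : Nat) : Int)
            then ((g^[t] i : Nat) : Int) else ((omin g i t : Nat) : Int))
          = ((omin g i (t+1) : Nat) : Int) := by
        show _ = ((min (omin g i t) (g^[t] i) : Nat) : Int)
        rcases le_or_gt (omin g i t) (g^[t] i) with h | h
        · rw [if_neg (by exact_mod_cast not_lt.mpr h), min_eq_left h]
        · rw [if_pos (by exact_mod_cast h), min_eq_right (by omega)]
      rw [hmin, hstep, hcast]
      exact ih (t+1) (by omega) (by omega) (by omega)
    · have hteq : t = ordg g m i := by omega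
      have hiq : g^[t] i = i := by rw [hteq]; exact iter_ordg g m i hper
      rw [cycB]
      rw [if_neg (by simp [hiq])]
      rw [hteq]

-- the running state of A's outer fold
theorem fold_inv (q : List Int) (g : Nat → Nat) (m : Nat)
    (hlt : ∀ i, i < m → g i < m)
    (hinj : ∀ i, i < m → ∀ j, j < m → g i = g j → i = j)
    (hq : ∀ x, x < m → q.getD x 0 = (g x : Int)) :
    ∀ k, k ≤ m →
    ((List.range k).foldl (fun (st : List Bool × Int) (i : Nat) =>
        if st.1.getD i false then st
        else
          let r := walkA q (m + 1) st.1 (i : Int) 0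
          if r.2 > 2 then (r.1, st.2 + PySem.Int.floordiv (r.2 - 1) 2) else (r.1, st.2))
      (List.replicate m false, (0:Int))).1.length = m ∧
    (∀ x, x < m →
      (((List.range k).foldl (fun (st : List Bool × Int) (i : Nat) =>
        if st.1.getD i false then st
        else
          let r := walkA q (m + 1) st.1 (i : Int) 0
          if r.2 > 2 then (r.1, st.2 + PySem.Int.floordiv (r.2 - 1) 2) else (r.1, st.2))
      (List.replicate m false, (0:Int))).1.getD x false = true ↔ Vis g k x)) ∧
    ((List.range k).foldl (fun (st : List Bool × Int) (i : Nat) =>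
        if st.1.getD i false then st
        else
          let r := walkA q (m + 1) st.1 (i : Int) 0
          if r.2 > 2 then (r.1, st.2 + PySem.Int.floordiv (r.2 - 1) 2) else (r.1, st.2))
      (List.replicate m false, (0:Int))).2
      = ((List.range k).map (fun (i : Nat) =>
          let r := cycB q (m + 1) (i : Int) 1 (i : Int) (q.getD i 0)
          if r.2 = (i : Int) then PySem.Int.floordiv (r.1 - 1) 2 else 0)).sum := by
  intro k
  induction k with
  | zero =>
    intro _
    refine ⟨by simp, ?_, by simp⟩
    intro x hx
    simp only [List.range_zero, List.foldl_nil]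
    constructor
    · intro h
      exfalso
      simp [List.getD] at h
    · rintro ⟨t, ht⟩; omega
  | succ k ih =>
    intro hk
    obtain ⟨ihlen, ihrep, ihans⟩ := ih (by omega)
    rw [List.range_succ, List.foldl_append, List.map_append, List.sum_append]
    simp only [List.foldl_cons, List.foldl_nil, List.map_cons, List.map_nil, List.sum_cons,
      List.sum_nil, add_zero]
    set A := (List.range k).foldl (fun (st : List Bool × Int) (i : Nat) =>
        if st.1.getD i false then st
        else
          let r := walkA q (m + 1) st.1 (i : Int) 0
          if r.2 > 2 then (r.1, st.2 + PySem.Int.floordiv (r.2 - 1) 2) else (r.1, st.2))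
      (List.replicate m false, (0:Int)) with hA
    have hkm : k < m := by omega
    have hper := existsPeriod g m hlt hinj k hkm
    -- B's term for index k via cycB_spec
    have homin1 : omin g k 1 = k := by unfold omin omin; simp
    have hBstart : q.getD k 0 = ((g^[1] k : Nat) : Int) := by
      rw [Function.iterate_one]; exact hq k hkm
    have hBw0 := cycB_spec q g m hlt hinj hq k hkm (m + 1) 1 (le_refl _)
      (ordg_pos g m k) (by have := ordg_le g m k hper; omega)
    rw [homin1, Nat.cast_one] at hBw0
    have hBw : cycB q (m + 1) ((k : Nat) : Int) 1 ((k : Nat) : Int) (q.getD k 0)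
        = (((ordg g m k : Nat) : Int), ((omin g k (ordg g m k) : Nat) : Int)) := by
      rw [hBstart]; exact hBw0
    by_cases hlead : IsLead g k
    · -- k is the minimum of its cycle: A walks and adds, B's term adds the same
      have hfalse : A.1.getD k false = false := by
        rcases Bool.eq_false_or_eq_true (A.1.getD k false) with h | h
        · exfalso
          exact absurd ((ihrep k hkm).1 h) (by rw [vis_self_iff]; simp [hlead])
        · exact h
      rw [hfalse]
      simp only [Bool.false_eq_true, if_false]
      obtain ⟨vis', heq, hlen', hrep'⟩ := walkA_spec q g m hlt hinj hq k hkm hlead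
        (m + 1) 0 A.1 (by omega) (by have := ordg_le g m k hper; omega) ihlen
        (by
          intro x hx
          rw [ihrep x hx]
          constructor
          · intro h; exact Or.inl h
          · rintro (h | ⟨s, hs, -⟩)
            · exact h
            · omega)
      rw [Function.iterate_zero_apply] at heq
      rw [Nat.cast_zero] at heq
      rw [heq, hBw]
      have hmeq : omin g k (ordg g m k) = k := (omin_lead_iff g m k hkm hper).2 hlead
      rw [hmeq]
      rw [if_pos rfl]
      rcases Nat.lt_or_ge 2 (ordg g m k) with hord | hord
      · rw [if_pos (by show (2:Int) < ((ordg g m k : Nat) : Int); exact_mod_cast hord)]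
        refine ⟨hlen', ?_, by rw [ihans]⟩
        intro x hx
        rw [hrep' x hx, step_lead g m hlt hinj k hkm x hx]
      · rw [if_neg (by show ¬ ((2:Int) < ((ordg g m k : Nat) : Int)); exact_mod_cast not_lt.mpr hord)]
        refine ⟨hlen', ?_, ?_⟩
        · intro x hx
          rw [hrep' x hx, step_lead g m hlt hinj k hkm x hx]
        · rw [ihans]
          have h1 := ordg_pos g m k
          have : ordg g m k = 1 ∨ ordg g m k = 2 := by omega
          rcases this with h | h <;> rw [h] <;> norm_num
    · -- k is not the minimum of its cycle: A skips, B's term is 0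
      have htrue : A.1.getD k false = true := by
        exact (ihrep k hkm).2 ((vis_self_iff g k).2 hlead)
      rw [htrue]
      simp only [if_true]
      rw [hBw]
      have hmlt := omin_notlead g m k hkm hper hlead
      rw [if_neg (by
        intro hcon
        have hcon' : ((omin g k (ordg g m k) : Nat) : Int) = ((k : Nat) : Int) := hcon
        have : omin g k (ordg g m k) = k := by exact_mod_cast hcon'
        omega)]
      refine ⟨ihlen, ?_, by rw [ihans, add_zero]⟩
      intro x hx
      rw [ihrep x hx, step_notlead g k x hlead]

-- ===== VERDICT (by name: the statement is the Claim_ definition above) =====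
theorem solve_spec : Claim_equal_solve := by
  unfold Claim_equal_solve
  intro n p hdom hpre
  unfold Spec_solve
  rcases hpre with hneg | ⟨hn, hmem⟩
  · show solve n p = solve_alt n p
    unfold solve solve_alt
    rw [Int.toNat_of_nonpos hneg]
    simp
  have hnt : n.toNat = p.length := by rw [hn]; simp
  -- p is a permutation of 1..m
  have hRnd : ((List.range p.length).map (fun (k : Nat) => ((k : Int) + 1))).Nodup := by
    refine List.Nodup.map ?_ List.nodup_range
    intro a b h
    have h' : (a : Int) + 1 = (b : Int) + 1 := h
    omega
  have hRsub : ((List.range p.length).map (fun (k : Nat) => ((k : Int) + 1))) ⊆ p := by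
    intro x hx
    obtain ⟨k, hk, rfl⟩ := List.mem_map.1 hx
    exact hmem k hk
  have hperm : p.Perm ((List.range p.length).map (fun (k : Nat) => ((k : Int) + 1))) :=
    List.Perm.symm (List.Subperm.perm_of_length_le
      (List.subperm_of_subset hRnd hRsub) (by simp))
  have hpnd : p.Nodup := (List.Perm.nodup_iff hperm).2 hRnd
  have hval : ∀ x ∈ p, 1 ≤ x ∧ x ≤ (p.length : Int) := by
    intro x hx
    obtain ⟨k, hk, rfl⟩ := List.mem_map.1 ((List.Perm.mem_iff hperm).1 hx)
    rw [List.mem_range] at hk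
    omega
  -- A's in-place decremented list equals B's decremented copy
  obtain ⟨hqlen, hqx⟩ := decAux p p.length (le_refl _)
  set qA := (List.range p.length).foldl (fun l i => l.set i (l.getD i 0 - 1)) p with hqdef
  set qB := (List.range p.length).map (fun i => p.getD i 0 - 1) with hqBdef
  have hqAx : ∀ x, (h : x < p.length) → qA.getD x 0 = p[x] - 1 := by
    intro x h; rw [hqx x h, if_pos h]
  have hqeq : qA = qB := by
    apply List.ext_getElem
    · rw [hqlen, hqBdef]; simp
    · intro x hx1 hx2
      have hxp : x < p.length := by omega
      rw [← List.getD_eq_getElem qA 0 hx1, hqAx x hxp]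
      simp only [hqBdef, List.getElem_map, List.getElem_range]
      rw [List.getD_eq_getElem p 0 hxp]
  -- the permutation function g
  have hq : ∀ x, x < p.length → qA.getD x 0 = (gfun qA x : Int) := by
    intro x h
    have hb := hval p[x] (List.getElem_mem h)
    unfold gfun
    rw [hqAx x h]
    rw [Int.toNat_of_nonneg (by omega)]
  have hlt : ∀ x, x < p.length → gfun qA x < p.length := by
    intro x h
    have hb := hval p[x] (List.getElem_mem h)
    unfold gfun
    rw [hqAx x h]
    omega
  have hinj : ∀ i, i < p.length → ∀ j, j < p.length → gfun qA i = gfun qA j → i = j := by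
    intro i hi j hj h
    have h1 : qA.getD i 0 = qA.getD j 0 := by
      rw [hq i hi, hq j hj, h]
    rw [hqAx i hi, hqAx j hj] at h1
    exact (List.Nodup.getElem_inj_iff hpnd).1 (by omega)
  -- assemble
  show solve n p = solve_alt n p
  unfold solve solve_alt
  rw [hnt, ← hqBdef, ← hqeq, ← hqdef]
  exact (fold_inv qA (gfun qA) p.length hlt hinj hq p.length (le_refl _)).2.2
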